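-- pv_equiv track=rewrite | github.com/k-saito-stack/Trends | packages/connectors/tiktok_creative_center.py | _evidence_url
-- ===== SOURCE A (Python) =====
-- from collections.abc import Sequence
--
-- TIKTOK_SURFACE_PATHS = {
--     "hashtag": "hashtag",
--     "song": "song",
--     "creator": "creator",
--     "video": "video",
-- }
--
-- PRIMARY_COUNTRY_CODE = "JP"
--
-- def _evidence_url(surface: str, countries: Sequence[str]) -> str:
--     country_code = PRIMARY_COUNTRY_CODE
--     for country in countries:
--         if country == PRIMARY_COUNTRY_CODE:
--             country_code = country
--             break
--         if country:
--             country_code = country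
--     return f"{_browser_page_url(surface)}?countryCode={country_code}&period=7"
--
-- def _browser_page_url(surface: str) -> str:
--     path = TIKTOK_SURFACE_PATHS.get(surface, "hashtag")
--     return f"https://ads.tiktok.com/business/creativecenter/inspiration/popular/{path}/pad/en"
-- ===== SOURCE B (Python) =====
-- from collections.abc import Sequence
--
-- TIKTOK_SURFACE_PATHS = {
--     "hashtag": "hashtag",
--     "song": "song",
--     "creator": "creator",
--     "video": "video",
-- }
--
-- PRIMARY_COUNTRY_CODE = "JP"
--
-- def _browser_page_url(surface: str) -> str:
--     path = TIKTOK_SURFACE_PATHS.get(surface, "hashtag")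
--     return f"https://ads.tiktok.com/business/creativecenter/inspiration/popular/{path}/pad/en"
--
-- def _evidence_url(surface: str, countries: Sequence[str]) -> str:
--     if PRIMARY_COUNTRY_CODE in countries:
--         country_code = PRIMARY_COUNTRY_CODE
--     else:
--         country_code = next((c for c in reversed(countries) if c), PRIMARY_COUNTRY_CODE)
--     return f"{_browser_page_url(surface)}?countryCode={country_code}&period=7"
-- ===== Notes on version B (the rewrite author's own statement) =====
-- stated objective: idiomatic
-- what changed: Replaced the stateful forward loop with early break by a membership test for 'JP' plus a reverse search for the last truthy country, defaulting to 'JP'.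
import Mathlib
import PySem

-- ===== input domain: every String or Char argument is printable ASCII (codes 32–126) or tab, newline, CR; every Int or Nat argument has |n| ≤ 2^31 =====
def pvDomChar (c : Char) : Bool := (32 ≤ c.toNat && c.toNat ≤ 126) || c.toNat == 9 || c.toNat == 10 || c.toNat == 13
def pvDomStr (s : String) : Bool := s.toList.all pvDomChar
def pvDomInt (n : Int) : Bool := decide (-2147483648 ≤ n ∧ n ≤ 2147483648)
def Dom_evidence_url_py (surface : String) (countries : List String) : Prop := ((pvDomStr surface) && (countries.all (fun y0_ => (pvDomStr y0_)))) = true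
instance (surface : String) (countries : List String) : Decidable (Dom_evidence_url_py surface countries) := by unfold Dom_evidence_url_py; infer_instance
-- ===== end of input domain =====

-- One honest line: B replaces A's stateful forward loop (running value + early break)
-- by a membership test for "JP" and a reverse search for the last truthy country (idiomatic decomposition).

-- ===== PORT A =====
def pvSurfacePaths : PySem.Dict String String :=
  PySem.Dict.ofList [("hashtag", "hashtag"), ("song", "song"), ("creator", "creator"), ("video", "video")]

def pvBrowserPageUrl (surface : String) : String :=
  let path := PySem.Dict.getD pvSurfacePaths surface "hashtag"
  "https://ads.tiktok.com/business/creativecenter/inspiration/popular/" ++ path ++ "/pad/en"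

-- the for-loop of A: running country_code, break on "JP", update on truthy
def pvLoopA (cur : String) : List String → String
  | [] => cur
  | c :: rest =>
      if c == "JP" then c
      else if c ≠ "" then pvLoopA c rest
      else pvLoopA cur rest

def evidence_url_py (surface : String) (countries : List String) : String :=
  let country_code := pvLoopA "JP" countries
  pvBrowserPageUrl surface ++ "?countryCode=" ++ country_code ++ "&period=7"

-- ===== PORT B =====
def evidence_url_py_alt (surface : String) (countries : List String) : String :=
  let country_code :=
    if countries.contains "JP" then "JP"
    else (countries.reverse.find? (fun c => c ≠ "")).getD "JP"
  pvBrowserPageUrl surface ++ "?countryCode=" ++ country_code ++ "&period=7"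

-- ===== PRECONDITION & SPEC =====
def Spec_evidence_url_py (surface : String) (countries : List String) (out : String) : Prop := out = evidence_url_py_alt surface countries
instance (surface : String) (countries : List String) (out : String) : Decidable (Spec_evidence_url_py surface countries out) := by unfold Spec_evidence_url_py; infer_instance

-- ===== CLAIM (what is proved, stated in full; the proofs are below) =====
def Claim_equal_evidence_url_py : Prop := ∀ (surface : String) (countries : List String), Dom_evidence_url_py surface countries → Spec_evidence_url_py surface countries (evidence_url_py surface countries)

-- ===== LEMMAS AND PROOFS =====

-- characterisation of A's loop: "JP" anywhere wins, else the last truthy element, else the start value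
theorem pvLoopA_eq (l : List String) (cur : String) :
    pvLoopA cur l =
      if l.contains "JP" then "JP"
      else (l.reverse.find? (fun c => c ≠ "")).getD cur := by
  induction l generalizing cur with
  | nil => simp [pvLoopA]
  | cons c rest ih =>
    by_cases hJP : c = "JP"
    · simp [pvLoopA, hJP]
    · have hc : (c == "JP") = false := by simp [hJP]
      by_cases hmem : "JP" ∈ rest
      · by_cases hne : c = "" <;> simp [pvLoopA, hc, hne, ih, hmem]
      · by_cases hne : c = "" <;>
          simp only [pvLoopA, hc, Bool.false_eq_true, if_false, ne_eq, hne,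
            not_false_eq_true, not_true_eq_false, if_true, if_false, ih, List.contains_cons,
            List.reverse_cons] <;>
          simp [hmem, List.find?_append, hne]
        exact fun h => absurd h.symm hJP

-- ===== VERDICT (by name: the statement is the Claim_ definition above) =====
theorem evidence_url_py_spec : Claim_equal_evidence_url_py := by
  intro surface countries _
  unfold Spec_evidence_url_py evidence_url_py evidence_url_py_alt
  rw [pvLoopA_eq]
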